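-- pv_equiv track=rewrite | github.com/MaxShroyer/MD_RL_finetune_scripts | DEPICATED_pokemon_cards/build_pokemon_cards_dataset.py | _parse_type_list
-- ===== SOURCE A (Python) =====
-- from typing import Any, Optional
--
-- def _normalize_spaces(value: Any) -> str:
--     return " ".join(str(value or "").strip().split())
--
-- def _parse_type_list(raw_types: str) -> list[str]:
--     parts = [_normalize_spaces(item) for item in raw_types.split(",")]
--     out: list[str] = []
--     seen: set[str] = set()
--     for part in parts:
--         if not part:
--             continue
--         key = part.lower()
--         if key in seen:
--             continue
--         seen.add(key)
--         out.append(part)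
--     out.sort(key=lambda item: item.lower())
--     return out
-- ===== SOURCE B (Python) =====
-- def _normalize_spaces(value) -> str:
--     return " ".join(str(value or "").strip().split())
--
--
-- def _parse_type_list(raw_types: str) -> list[str]:
--     # Normalize, drop empties, sort stably by lowercase key, then dedupe
--     # adjacent equal-lowercase items in one pass (keeps first occurrence).
--     items = [p for p in (_normalize_spaces(x) for x in raw_types.split(",")) if p]
--     items.sort(key=str.lower)
--     out: list[str] = []
--     prev = None
--     for item in items:
--         key = item.lower()
--         if key != prev:
--             out.append(item)
--             prev = key
--     return out
-- ===== Notes on version B (the rewrite author's own statement) =====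
-- stated objective: alternative
-- what changed: Replaces A's seen-set first-occurrence dedupe followed by a sort with a sort-first pipeline: stable-sort the normalized nonempty pieces by lowercase key, then a single adjacent-scan dedupe that needs no set; stability guarantees the same kept case-forms and order.
import Mathlib
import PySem

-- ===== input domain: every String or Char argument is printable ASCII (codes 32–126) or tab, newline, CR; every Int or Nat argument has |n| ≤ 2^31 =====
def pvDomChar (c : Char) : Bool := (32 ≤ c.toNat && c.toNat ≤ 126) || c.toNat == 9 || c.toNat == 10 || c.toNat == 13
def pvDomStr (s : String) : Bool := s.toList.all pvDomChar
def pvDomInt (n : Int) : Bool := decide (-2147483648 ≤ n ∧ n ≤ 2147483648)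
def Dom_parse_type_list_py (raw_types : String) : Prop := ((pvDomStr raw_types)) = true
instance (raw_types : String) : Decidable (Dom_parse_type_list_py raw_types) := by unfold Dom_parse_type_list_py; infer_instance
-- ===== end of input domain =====

-- B replaces A's seen-set dedupe-then-sort with a stable sort by lowercase key followed by a
-- single adjacent-scan dedupe (no set); same return value, objective: alternative decomposition.

-- ===== PORT A =====
-- _normalize_spaces(value) = " ".join(str(value or "").strip().split())  (on a str argument,
-- 'str(value or "")' is the string itself, so the port takes a String directly)
def pvNormSpaces (s : String) : String :=
  PySem.Str.join " " (PySem.Str.split₀ (PySem.Str.strip s))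

-- the body of A's for-loop over parts, with state (out, seen)
def pvStepA (acc : List String × PySem.Set String) (part : String) :
    List String × PySem.Set String :=
  if part = "" then acc
  else
    let key := PySem.Str.lower part
    if PySem.Set.contains acc.2 key then acc
    else (acc.1 ++ [part], PySem.Set.add acc.2 key)

def parse_type_list_py (raw_types : String) : List String :=
  let parts := ((PySem.Str.split? raw_types ",").getD []).map pvNormSpaces
  let r := parts.foldl pvStepA ([], PySem.Set.empty)
  PySem.List.sorted r.1 (fun item => PySem.Str.lower item) false

-- ===== PORT B =====
-- the body of B's for-loop over the sorted items, with state (out, prev)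
def pvStepB (acc : List String × Option String) (item : String) :
    List String × Option String :=
  let key := PySem.Str.lower item
  if some key = acc.2 then acc
  else (acc.1 ++ [item], some key)

def parse_type_list_py_alt (raw_types : String) : List String :=
  let items := (((PySem.Str.split? raw_types ",").getD []).map pvNormSpaces).filter
    (fun p => p ≠ "")
  let sortedItems := PySem.List.sorted items (fun s => PySem.Str.lower s) false
  (sortedItems.foldl pvStepB ([], none)).1

-- ===== PRECONDITION & SPEC =====
def Spec_parse_type_list_py (raw_types : String) (out : List String) : Prop := out = parse_type_list_py_alt raw_types
instance (raw_types : String) (out : List String) : Decidable (Spec_parse_type_list_py raw_types out) := by unfold Spec_parse_type_list_py; infer_instance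

-- ===== CLAIM (what is proved, stated in full; the proofs are below) =====
def Claim_equal_parse_type_list_py : Prop := ∀ (raw_types : String), Dom_parse_type_list_py raw_types → Spec_parse_type_list_py raw_types (parse_type_list_py raw_types)

-- ===== LEMMAS AND PROOFS =====

-- recursive form of A's loop (empties skipped via the filter in pv_foldA)
def pvDedupG (seen : PySem.Set String) : List String → List String
  | [] => []
  | p :: ps =>
    if PySem.Set.contains seen (PySem.Str.lower p) then pvDedupG seen ps
    else p :: pvDedupG (PySem.Set.add seen (PySem.Str.lower p)) ps

-- recursive form of B's adjacent-dedupe loop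
def pvAdj (prev : Option String) : List String → List String
  | [] => []
  | y :: ys =>
    if some (PySem.Str.lower y) = prev then pvAdj prev ys
    else y :: pvAdj (some (PySem.Str.lower y)) ys

lemma pv_foldA : ∀ (ps out : List String) (seen : PySem.Set String),
    (ps.foldl pvStepA (out, seen)).1
      = out ++ pvDedupG seen (ps.filter (fun p => p ≠ "")) := by
  intro ps
  induction ps with
  | nil => intro out seen; simp [pvDedupG]
  | cons p ps ih =>
    intro out seen
    by_cases hp : p = ""
    · subst hp
      simp [pvStepA, List.filter, ih]
    · by_cases hc : PySem.Str.lower p ∈ seen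
      · simp [pvStepA, hp, List.filter, ih, pvDedupG, hc]
      · simp [pvStepA, hp, List.filter, ih, pvDedupG, hc]
  
lemma pv_foldB : ∀ (s out : List String) (prev : Option String),
    (s.foldl pvStepB (out, prev)).1 = out ++ pvAdj prev s := by
  intro s
  induction s with
  | nil => intro out prev; simp [pvAdj]
  | cons y ys ih =>
    intro out prev
    by_cases h : some (PySem.Str.lower y) = prev
    · simp [pvStepB, h, pvAdj, ih]
    · simp [pvStepB, h, pvAdj, ih]

lemma pv_mem_dedupG (x : String) : ∀ (m : List String) (seen : PySem.Set String),
    x ∈ pvDedupG seen m ↔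
      (PySem.Str.lower x ∉ seen ∧
        m.find? (fun y => PySem.Str.lower y == PySem.Str.lower x) = some x) := by
  intro m
  induction m with
  | nil => intro seen; simp [pvDedupG]
  | cons p ps ih =>
    intro seen
    by_cases hk : PySem.Str.lower p = PySem.Str.lower x
    · by_cases hc : PySem.Str.lower p ∈ seen
      · have hcb : PySem.Set.contains seen (PySem.Str.lower p) = true := by
          simpa [PySem.Set.contains] using hc
        rw [pvDedupG, if_pos hcb, ih]
        rw [List.find?_cons_of_pos (by simp [hk])]
        constructor
        · rintro ⟨h1, h2⟩; exact absurd hc (hk ▸ h1)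
        · rintro ⟨h1, h2⟩; exact absurd hc (hk ▸ h1)
      · have hcb : ¬ PySem.Set.contains seen (PySem.Str.lower p) = true := by
          simpa [PySem.Set.contains] using hc
        rw [pvDedupG, if_neg hcb]
        rw [List.find?_cons_of_pos (by simp [hk])]
        simp only [List.mem_cons, ih, PySem.Set.mem_add]
        constructor
        · rintro (rfl | ⟨h1, h2⟩)
          · exact ⟨hk ▸ hc, rfl⟩
          · exact absurd (Or.inr hk.symm) h1
        · rintro ⟨h1, h2⟩
          exact Or.inl (Option.some_injective _ h2).symm
    · have rhs_eq : (p :: ps).find? (fun y => PySem.Str.lower y == PySem.Str.lower x)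
          = ps.find? (fun y => PySem.Str.lower y == PySem.Str.lower x) :=
        List.find?_cons_of_neg (by simp [hk])
      by_cases hc : PySem.Set.contains seen (PySem.Str.lower p) = true
      · rw [pvDedupG, if_pos hc, ih, rhs_eq]
      · rw [pvDedupG, if_neg hc, rhs_eq]
        simp only [List.mem_cons, ih, PySem.Set.mem_add]
        constructor
        · rintro (rfl | ⟨h1, h2⟩)
          · exact absurd rfl hk
          · exact ⟨fun hmem => h1 (Or.inl hmem), h2⟩
        · rintro ⟨h1, h2⟩
          refine Or.inr ⟨?_, h2⟩
          rintro (hmem | heq)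
          · exact h1 hmem
          · exact hk heq.symm

lemma pv_mem_adj (x : String) : ∀ (s : List String),
    s.Pairwise (fun a b => PySem.Str.lower a ≤ PySem.Str.lower b) →
    ∀ (prev : Option String),
    (∀ p, prev = some p → ∀ y ∈ s, p ≤ PySem.Str.lower y) →
    (x ∈ pvAdj prev s ↔
      (prev ≠ some (PySem.Str.lower x) ∧
        s.find? (fun y => PySem.Str.lower y == PySem.Str.lower x) = some x)) := by
  intro s
  induction s with
  | nil => intro _ prev _; simp [pvAdj]
  | cons y ys ih =>
    intro hs prev hinv
    rw [List.pairwise_cons] at hs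
    obtain ⟨hy, hys⟩ := hs
    by_cases hk : PySem.Str.lower y = PySem.Str.lower x
    · rw [List.find?_cons_of_pos (by simp [hk])]
      by_cases hp : some (PySem.Str.lower y) = prev
      · rw [pvAdj, if_pos hp]
        rw [ih hys prev (fun p hp' z hz => hinv p hp' z (List.mem_cons_of_mem _ hz))]
        constructor
        · rintro ⟨h1, h2⟩
          -- x ∈ ys with lower x = lower y, but prev = some (lower y) = some (lower x): contra
          exact absurd (hp.symm.trans (by rw [hk])) h1
        · rintro ⟨h1, h2⟩
          exact absurd (hp.symm.trans (by rw [hk])) h1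
      · rw [pvAdj, if_neg hp]
        constructor
        · intro hmem
          rcases List.mem_cons.mp hmem with rfl | hmem'
          · exact ⟨fun h => hp (h.symm), rfl⟩
          · -- x ∈ pvAdj (some (lower y)) ys with lower x = lower y: impossible
            have := (ih hys (some (PySem.Str.lower y))
              (fun p hp' z hz => by
                cases Option.some_injective _ hp'
                exact List.rel_of_pairwise_cons (List.pairwise_cons.mpr ⟨hy, hys⟩) hz)).mp hmem'
            exact absurd (by rw [hk]) this.1
        · rintro ⟨h1, h2⟩
          have hxy : x = y := (Option.some_injective _ h2).symm
          exact hxy ▸ List.mem_cons_self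
    · rw [List.find?_cons_of_neg (by simp [hk])]
      by_cases hp : some (PySem.Str.lower y) = prev
      · rw [pvAdj, if_pos hp]
        rw [ih hys prev (fun p hp' z hz => hinv p hp' z (List.mem_cons_of_mem _ hz))]
      · rw [pvAdj, if_neg hp]
        have ihy := ih hys (some (PySem.Str.lower y))
          (fun p hp' z hz => by
            cases Option.some_injective _ hp'
            exact hy z hz)
        constructor
        · intro hmem
          rcases List.mem_cons.mp hmem with rfl | hmem'
          · exact absurd rfl hk
          · obtain ⟨h1, h2⟩ := ihy.mp hmem'
            refine ⟨?_, h2⟩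
            -- prev = some (lower x) would force lower x = lower y
            intro hpx
            have hx_mem : x ∈ ys := List.mem_of_find?_eq_some h2
            have h_le : PySem.Str.lower y ≤ PySem.Str.lower x := hy x hx_mem
            have h_ge : PySem.Str.lower x ≤ PySem.Str.lower y := by
              have := hinv (PySem.Str.lower x) hpx y List.mem_cons_self
              exact this
            exact hk (le_antisymm h_le h_ge)
        · rintro ⟨h1, h2⟩
          refine List.mem_cons_of_mem _ (ihy.mpr ⟨?_, h2⟩)
          intro h
          exact hk (Option.some_injective _ h)
  
lemma pv_adj_gt : ∀ (s : List String),
    s.Pairwise (fun a b => PySem.Str.lower a ≤ PySem.Str.lower b) →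
    ∀ (p : String), (∀ y ∈ s, p ≤ PySem.Str.lower y) →
    ∀ z ∈ pvAdj (some p) s, p < PySem.Str.lower z := by
  intro s
  induction s with
  | nil => intro _ p _ z hz; simp [pvAdj] at hz
  | cons y ys ih =>
    intro hs p hinv z hz
    rw [List.pairwise_cons] at hs
    obtain ⟨hy, hys⟩ := hs
    by_cases hp : some (PySem.Str.lower y) = some p
    · rw [pvAdj, if_pos hp] at hz
      exact ih hys p (fun w hw => hinv w (List.mem_cons_of_mem _ hw)) z hz
    · rw [pvAdj, if_neg hp] at hz
      rcases List.mem_cons.mp hz with rfl | hz'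
      · exact lt_of_le_of_ne (hinv z List.mem_cons_self)
          (fun h => hp (by rw [h]))
      · have := ih hys (PySem.Str.lower y) hy z hz'
        exact lt_of_le_of_lt (hinv y List.mem_cons_self) this

lemma pv_pairwise_adj : ∀ (s : List String),
    s.Pairwise (fun a b => PySem.Str.lower a ≤ PySem.Str.lower b) →
    ∀ (prev : Option String),
    (pvAdj prev s).Pairwise (fun a b => PySem.Str.lower a < PySem.Str.lower b) := by
  intro s
  induction s with
  | nil => intro _ prev; simp [pvAdj]
  | cons y ys ih =>
    intro hs prev
    rw [List.pairwise_cons] at hs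
    obtain ⟨hy, hys⟩ := hs
    by_cases hp : some (PySem.Str.lower y) = prev
    · rw [pvAdj, if_pos hp]; exact ih hys prev
    · rw [pvAdj, if_neg hp]
      refine List.pairwise_cons.mpr ⟨?_, ih hys (some (PySem.Str.lower y))⟩
      exact pv_adj_gt ys hys (PySem.Str.lower y) hy

lemma pv_nodup_dedupG : ∀ (m : List String) (seen : PySem.Set String),
    (pvDedupG seen m).Nodup := by
  intro m
  induction m with
  | nil => intro seen; simp [pvDedupG]
  | cons p ps ih =>
    intro seen
    by_cases hc : PySem.Set.contains seen (PySem.Str.lower p) = true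
    · rw [pvDedupG, if_pos hc]; exact ih seen
    · rw [pvDedupG, if_neg hc]
      refine List.nodup_cons.mpr ⟨?_, ih _⟩
      intro hmem
      have := (pv_mem_dedupG p ps _).mp hmem
      exact this.1 ((PySem.Set.mem_add seen (PySem.Str.lower p) (PySem.Str.lower p)).mpr
        (Or.inr rfl))

lemma pv_find?_insertBy (x k : String) : ∀ (ys : List String),
    ys.Pairwise (fun a b => PySem.Str.lower a ≤ PySem.Str.lower b) →
    (PySem.List.insertBy (fun a b => decide (PySem.Str.lower a < PySem.Str.lower b)) x ys).find?
        (fun y => PySem.Str.lower y == k)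
      = (ys.find? (fun y => PySem.Str.lower y == k)).or
          (if PySem.Str.lower x == k then some x else none) := by
  intro ys
  induction ys with
  | nil =>
    intro _
    simp only [PySem.List.insertBy, List.find?_nil, Option.none_or]
    by_cases hk : PySem.Str.lower x = k
    · rw [List.find?_cons_of_pos (by simp [hk]), if_pos (by simp [hk])]
    · rw [List.find?_cons_of_neg (by simp [hk]), if_neg (by simp [hk]), List.find?_nil]
  | cons y ys ih =>
    intro hs
    rw [List.pairwise_cons] at hs
    obtain ⟨hy, hys⟩ := hs
    by_cases hlt : PySem.Str.lower x < PySem.Str.lower y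
    · rw [show PySem.List.insertBy (fun a b => decide (PySem.Str.lower a < PySem.Str.lower b)) x
          (y :: ys) = x :: y :: ys from by simp [PySem.List.insertBy, hlt]]
      by_cases hk : PySem.Str.lower x = k
      · have hnone : (y :: ys).find? (fun z => PySem.Str.lower z == k) = none := by
          rw [List.find?_eq_none]
          intro z hz
          simp only [beq_iff_eq]
          intro hzk
          have hyz : PySem.Str.lower y ≤ PySem.Str.lower z := by
            rcases List.mem_cons.mp hz with rfl | hz'
            · exact le_refl _
            · exact hy z hz'
          exact absurd (hzk ▸ hyz) (not_le.mpr (hk ▸ hlt))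
        rw [List.find?_cons_of_pos (by simp [hk]), hnone, if_pos (by simp [hk])]
        rfl
      · rw [List.find?_cons_of_neg (by simp [hk]), if_neg (by simp [hk]), Option.or_none]
    · rw [show PySem.List.insertBy (fun a b => decide (PySem.Str.lower a < PySem.Str.lower b)) x
          (y :: ys) = y :: PySem.List.insertBy
            (fun a b => decide (PySem.Str.lower a < PySem.Str.lower b)) x ys from by
          simp [PySem.List.insertBy, hlt]]
      by_cases hyk : PySem.Str.lower y = k
      · rw [List.find?_cons_of_pos (by simp [hyk]), List.find?_cons_of_pos (by simp [hyk])]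
        rfl
      · rw [List.find?_cons_of_neg (by simp [hyk]), List.find?_cons_of_neg (by simp [hyk]),
          ih hys]

lemma pv_find?_sorted (k : String) (l : List String) :
    (PySem.List.sorted l (fun s => PySem.Str.lower s) false).find?
        (fun y => PySem.Str.lower y == k)
      = l.find? (fun y => PySem.Str.lower y == k) := by
  induction l using List.reverseRecOn with
  | nil => rfl
  | append_singleton l x ih =>
    have hs : PySem.List.sorted (l ++ [x]) (fun s => PySem.Str.lower s) false
        = PySem.List.insertBy (fun a b => decide (PySem.Str.lower a < PySem.Str.lower b)) x
            (PySem.List.sorted l (fun s => PySem.Str.lower s) false) := by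
      rw [PySem.List.sorted_eq_foldl_insertBy, PySem.List.sorted_eq_foldl_insertBy,
        List.foldl_append]
      rfl
    rw [hs, pv_find?_insertBy x k _ (PySem.List.sorted_pairwise l _), ih, List.find?_append]
    congr 1
    by_cases hk : PySem.Str.lower x = k
    · rw [List.find?_cons_of_pos (by simp [hk]), if_pos (by simp [hk])]
    · rw [List.find?_cons_of_neg (by simp [hk]), if_neg (by simp [hk]), List.find?_nil]

-- ===== VERDICT (by name: the statement is the Claim_ definition above) =====
theorem parse_type_list_py_spec : Claim_equal_parse_type_list_py := by
  intro raw _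
  unfold Spec_parse_type_list_py parse_type_list_py parse_type_list_py_alt
  simp only [pv_foldA, pv_foldB, List.nil_append]
  set lf := ((((PySem.Str.split? raw ",").getD []).map pvNormSpaces).filter
    (fun p => p ≠ "")) with hlf
  have hpw := PySem.List.sorted_pairwise lf (fun s => PySem.Str.lower s)
  have hinv : ∀ p, (none : Option String) = some p →
      ∀ y ∈ PySem.List.sorted lf (fun s => PySem.Str.lower s) false,
        p ≤ PySem.Str.lower y := by intro p hp; cases hp
  have hnodupAdj : (pvAdj none (PySem.List.sorted lf (fun s => PySem.Str.lower s) false)).Nodup :=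
    (pv_pairwise_adj _ hpw none).imp (fun h => fun heq => absurd (heq ▸ h) (lt_irrefl _))
  refine (PySem.List.sorted_eq_of_perm_of_pairwise_lt _ _ _ ?_ (pv_pairwise_adj _ hpw none)).symm.symm
  · rw [List.perm_ext_iff_of_nodup hnodupAdj (pv_nodup_dedupG lf PySem.Set.empty)]
    intro a
    rw [pv_mem_adj a _ hpw none hinv, pv_mem_dedupG, pv_find?_sorted]
    simp [PySem.Set.empty]
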